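-- pv_equiv track=rewrite | github.com/stenknutsen/HomeGrownPOSTagger | PhaseFourTagging.py | MD_UNK_better_IN_Tagger
-- ===== SOURCE A (Python) =====
-- def MD_UNK_better_IN_Tagger(sent):
--     sentToReturn = []
--     skip = 0
--
--     for i in range(len(sent)):
--
--         if skip>0:
--             skip = skip -1
--             continue
--
--
--         if (i)<0 | (i+3)>=len(sent):
--             sentToReturn += [sent[i]]
--             continue
--
--         leftContext = sent[i]
--         leftTarget = sent[i+1]
--         rightTarget = sent[i+2]
--         rightContext = sent[i+3]
--
--
--         if ((leftContext[1]=="MD")|((leftContext[1]=="UNK")&((leftContext[0].lower()=="will")|(leftContext[0].lower()=="must"))))&\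
--                 (leftTarget[1]=="UNK")&(rightTarget[0].lower()=="better")&(rightContext[1]=="IN"):
--
--             sentToReturn += [(leftContext[0],"MD")]
--             sentToReturn += [(leftTarget[0], "V")]
--             sentToReturn += [(rightTarget[0],"RB")]
--             sentToReturn += [rightContext]
--             skip = 3
--
--         else:
--             sentToReturn += [leftContext]
--
--     return sentToReturn
-- ===== SOURCE B (Python) =====
-- def MD_UNK_better_IN_Tagger(sent):
--     n = len(sent)
--
--     def matches(i):
--         lc, lt, rt, rc = sent[i], sent[i + 1], sent[i + 2], sent[i + 3]
--         return ((lc[1] == "MD" or (lc[1] == "UNK" and lc[0].lower() in ("will", "must")))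
--                 and lt[1] == "UNK" and rt[0].lower() == "better" and rc[1] == "IN")
--
--     # stage 1: collect the leftmost-greedy, non-overlapping match start positions
--     starts = []
--     i = 0
--     while i + 3 < n:
--         if matches(i):
--             starts.append(i)
--             i += 4
--         else:
--             i += 1
--
--     # stage 2: splice rewritten 4-windows between untouched slices of sent
--     out = []
--     prev = 0
--     for s in starts:
--         out += sent[prev:s]
--         lc, lt, rt, rc = sent[s], sent[s + 1], sent[s + 2], sent[s + 3]
--         out += [(lc[0], "MD"), (lt[0], "V"), (rt[0], "RB"), rc]
--         prev = s + 4
--     out += sent[prev:]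
--     return out
-- ===== Notes on version B (the rewrite author's own statement) =====
-- stated objective: alternative
-- what changed: Replaces A's single pass with a skip counter by a two-stage algorithm: first compute the list of non-overlapping match start positions, then rebuild the output by splicing the four rewritten tuples between untouched slices sent[prev:s]; no element-by-element emission or skip state.
import Mathlib
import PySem

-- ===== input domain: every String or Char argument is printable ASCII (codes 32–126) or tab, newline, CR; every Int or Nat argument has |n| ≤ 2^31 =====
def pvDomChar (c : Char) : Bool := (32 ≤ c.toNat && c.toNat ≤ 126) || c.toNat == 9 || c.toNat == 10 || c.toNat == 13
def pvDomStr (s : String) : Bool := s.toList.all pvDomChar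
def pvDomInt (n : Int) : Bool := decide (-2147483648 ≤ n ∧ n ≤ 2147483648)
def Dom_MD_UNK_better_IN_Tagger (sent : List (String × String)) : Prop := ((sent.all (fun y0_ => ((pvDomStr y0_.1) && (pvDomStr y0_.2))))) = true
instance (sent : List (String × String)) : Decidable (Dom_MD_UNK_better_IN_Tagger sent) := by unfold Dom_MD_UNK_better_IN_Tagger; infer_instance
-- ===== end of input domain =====

-- B replaces A's single pass with a skip counter by two stages: collect the match start
-- positions, then splice rewritten windows between untouched slices. Same return value.

-- ===== PORT A =====
-- A's window predicate, with bitwise |/& on bools (equal to or/and on bools).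
def pvMatch (lc lt rt rc : String × String) : Bool :=
  (lc.2 == "MD" || (lc.2 == "UNK" && (PySem.Str.lower lc.1 == "will" || PySem.Str.lower lc.1 == "must")))
    && lt.2 == "UNK" && PySem.Str.lower rt.1 == "better" && rc.2 == "IN"

-- sent[i] with 0 ≤ i < len(sent) always in A (the boundary guard `(i)<0 | (i+3)>=len(sent)`
-- chains to `i+3 >= len(sent)`), so pyGetD with a dummy default is exact here.
def pvAStep (sent : List (String × String)) (st : List (String × String) × Nat) (i : Nat) :
    List (String × String) × Nat :=
  let (out, skip) := st
  if skip > 0 then (out, skip - 1)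
  else if decide ((i : Int) + 3 ≥ sent.length) then
    (out ++ [PySem.List.pyGetD sent (i : Int) ("", "")], skip)
  else
    let lc := PySem.List.pyGetD sent (i : Int) ("", "")
    let lt := PySem.List.pyGetD sent ((i : Int) + 1) ("", "")
    let rt := PySem.List.pyGetD sent ((i : Int) + 2) ("", "")
    let rc := PySem.List.pyGetD sent ((i : Int) + 3) ("", "")
    if pvMatch lc lt rt rc then
      (out ++ [(lc.1, "MD")] ++ [(lt.1, "V")] ++ [(rt.1, "RB")] ++ [rc], 3)
    else (out ++ [lc], skip)

def MD_UNK_better_IN_Tagger (sent : List (String × String)) : List (String × String) :=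
  ((List.range sent.length).foldl (pvAStep sent) ([], 0)).1

-- ===== PORT B =====
-- Source B's matches(i): all four indices are in range where it is called (i + 3 < n).
def pvBMatch (sent : List (String × String)) (i : Nat) : Bool :=
  let lc := PySem.List.pyGetD sent (i : Int) ("", "")
  let lt := PySem.List.pyGetD sent ((i : Int) + 1) ("", "")
  let rt := PySem.List.pyGetD sent ((i : Int) + 2) ("", "")
  let rc := PySem.List.pyGetD sent ((i : Int) + 3) ("", "")
  (lc.2 == "MD" || (lc.2 == "UNK" && (PySem.Str.lower lc.1 == "will" || PySem.Str.lower lc.1 == "must")))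
    && lt.2 == "UNK" && PySem.Str.lower rt.1 == "better" && rc.2 == "IN"

-- stage 1: the while loop collecting match start positions
def pvStarts (sent : List (String × String)) (i : Nat) : List Nat :=
  if i + 3 < sent.length then
    if pvBMatch sent i then i :: pvStarts sent (i + 4) else pvStarts sent (i + 1)
  else []
termination_by sent.length - i
decreasing_by all_goals omega

-- stage 2: the for loop over starts, splicing slices and rewritten windows
def pvSplice (sent : List (String × String)) : Nat → List Nat → List (String × String)
  | prev, [] => PySem.List.slice sent (some (prev : Int)) none
  | prev, s :: rest =>
      let lc := PySem.List.pyGetD sent (s : Int) ("", "")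
      let lt := PySem.List.pyGetD sent ((s : Int) + 1) ("", "")
      let rt := PySem.List.pyGetD sent ((s : Int) + 2) ("", "")
      let rc := PySem.List.pyGetD sent ((s : Int) + 3) ("", "")
      PySem.List.slice sent (some (prev : Int)) (some (s : Int))
        ++ [(lc.1, "MD"), (lt.1, "V"), (rt.1, "RB"), rc]
        ++ pvSplice sent (s + 4) rest

def MD_UNK_better_IN_Tagger_alt (sent : List (String × String)) : List (String × String) :=
  pvSplice sent 0 (pvStarts sent 0)

-- ===== PRECONDITION & SPEC =====
def Spec_MD_UNK_better_IN_Tagger (sent : List (String × String)) (out : List (String × String)) : Prop := out = MD_UNK_better_IN_Tagger_alt sent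
instance (sent : List (String × String)) (out : List (String × String)) : Decidable (Spec_MD_UNK_better_IN_Tagger sent out) := by unfold Spec_MD_UNK_better_IN_Tagger; infer_instance

-- ===== CLAIM (what is proved, stated in full; the proofs are below) =====
def Claim_equal_MD_UNK_better_IN_Tagger : Prop := ∀ (sent : List (String × String)), Dom_MD_UNK_better_IN_Tagger sent → Spec_MD_UNK_better_IN_Tagger sent (MD_UNK_better_IN_Tagger sent)

-- ===== LEMMAS AND PROOFS =====

-- proof-only middle form: the one-pass scan both programs are equivalent to
def pvBGo : List (String × String) → List (String × String)
  | lc :: lt :: rt :: rc :: rest =>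
      if pvMatch lc lt rt rc then
        (lc.1, "MD") :: (lt.1, "V") :: (rt.1, "RB") :: rc :: pvBGo rest
      else lc :: pvBGo (lt :: rt :: rc :: rest)
  | l => l

-- skip consumption: with skip = s and at least s indices left, s iterations only decrement
theorem foldl_skip (sent : List (String × String)) :
    ∀ (s i k : ℕ) (out : List (String × String)), s ≤ k →
      (List.range' i k).foldl (pvAStep sent) (out, s) =
      (List.range' (i + s) (k - s)).foldl (pvAStep sent) (out, 0) := by
  intro s
  induction s with
  | zero => intro i k out _; simp
  | succ n ih =>
      intro i k out h
      cases k with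
      | zero => omega
      | succ m =>
          rw [List.range'_succ]
          simp only [List.foldl_cons]
          have : pvAStep sent (out, n + 1) i = (out, n) := by simp [pvAStep]
          rw [this, show i + (n + 1) = (i + 1) + n by omega,
              show m + 1 - (n + 1) = m - n by omega]
          exact ih (i + 1) m out (by omega)

theorem pyGetD_idx (sent : List (String × String)) (i : ℕ) (h : i < sent.length) :
    PySem.List.pyGetD sent (i : Int) ("", "") = sent[i] := by
  rw [PySem.List.pyGetD_natCast]
  simp [List.getD, h]

theorem drop_four (sent : List (String × String)) (i : ℕ) (h : (i : Int) + 3 < sent.length) :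
    sent.drop i = sent[i]'(by omega) :: sent[i+1]'(by omega) :: sent[i+2]'(by omega)
      :: sent[i+3]'(by omega) :: sent.drop (i + 4) := by
  rw [List.drop_eq_getElem_cons (by omega), List.drop_eq_getElem_cons (by omega),
      List.drop_eq_getElem_cons (by omega), List.drop_eq_getElem_cons (by omega)]

theorem pvBGo_short (l : List (String × String)) (h : l.length ≤ 3) : pvBGo l = l := by
  match l, h with
  | [], _ => rfl
  | [a], _ => rfl
  | [a, b], _ => rfl
  | [a, b, c], _ => rfl

theorem pyGetD_shift (sent : List (String × String)) (i k : ℕ) (h : i + k < sent.length) :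
    PySem.List.pyGetD sent ((i : Int) + (k : Int)) ("", "") = sent[i + k] := by
  rw [show ((i : Int) + (k : Int)) = ((i + k : ℕ) : Int) by push_cast; ring]
  exact pyGetD_idx sent (i + k) h

-- A's fold equals the one-pass scan on the suffix
theorem loopA_eq_go (sent : List (String × String)) :
    ∀ (n i : ℕ) (out : List (String × String)), n = sent.length - i →
      ((List.range' i n).foldl (pvAStep sent) (out, 0)).1 = out ++ pvBGo (sent.drop i) := by
  intro n
  induction n using Nat.strong_induction_on with
  | _ n ih =>
    intro i out hn
    cases n with
    | zero =>
        have hd : sent.drop i = [] := List.drop_eq_nil_of_le (by omega)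
        simp [hd, pvBGo]
    | succ m =>
        have hi : i < sent.length := by omega
        rw [List.range'_succ, List.foldl_cons]
        by_cases hb : (i : Int) + 3 ≥ sent.length
        · have hstep : pvAStep sent (out, 0) i = (out ++ [sent[i]], 0) := by
            simp [pvAStep, hb, pyGetD_idx sent i hi]
          have hb' : sent.length ≤ i + 3 := by exact_mod_cast by omega
          have hA : pvBGo (sent.drop (i + 1)) = sent.drop (i + 1) :=
            pvBGo_short _ (by simp [List.length_drop]; omega)
          have hB : pvBGo (sent.drop i) = sent.drop i :=
            pvBGo_short _ (by simp [List.length_drop]; omega)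
          rw [hstep, ih m (by omega) (i + 1) _ (by omega), hA, hB,
              List.drop_eq_getElem_cons hi]
          simp
        · rw [not_le] at hb
          have h1 : i + 1 < sent.length := by omega
          have h2 : i + 2 < sent.length := by omega
          have h3 : i + 3 < sent.length := by omega
          have e0 := pyGetD_idx sent i hi
          have e1 := pyGetD_shift sent i 1 h1
          have e2 := pyGetD_shift sent i 2 h2
          have e3 := pyGetD_shift sent i 3 h3
          norm_num at e1 e2 e3
          rw [drop_four sent i hb]
          by_cases hm : pvMatch (sent[i]) (sent[i+1]) (sent[i+2]) (sent[i+3])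
          · have hstep : pvAStep sent (out, 0) i =
                (out ++ [(sent[i].1, "MD")] ++ [(sent[i+1].1, "V")] ++ [(sent[i+2].1, "RB")]
                   ++ [sent[i+3]], 3) := by
              simp [pvAStep, hb.not_ge, e0, e1, e2, e3, hm]
            rw [hstep, foldl_skip sent 3 (i + 1) m _ (by omega),
                ih (m - 3) (by omega) (i + 1 + 3) _ (by omega)]
            simp [pvBGo, hm, show i + 1 + 3 = i + 4 by ring]
          · have hstep : pvAStep sent (out, 0) i = (out ++ [sent[i]], 0) := by
              simp [pvAStep, hb.not_ge, e0, e1, e2, e3, hm]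
            rw [hstep, ih m (by omega) (i + 1) _ (by omega)]
            rw [List.drop_eq_getElem_cons h1, List.drop_eq_getElem_cons h2,
                List.drop_eq_getElem_cons h3]
            simp [pvBGo, hm]

-- pvBMatch at an in-range window is pvMatch of the four elements
theorem pvBMatch_eq (sent : List (String × String)) (i : ℕ) (h : i + 3 < sent.length) :
    pvBMatch sent i =
      pvMatch (sent[i]'(by omega)) (sent[i+1]'(by omega)) (sent[i+2]'(by omega)) (sent[i+3]'(by omega)) := by
  have e0 := pyGetD_idx sent i (by omega)
  have e1 := pyGetD_shift sent i 1 (by omega)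
  have e2 := pyGetD_shift sent i 2 (by omega)
  have e3 := pyGetD_shift sent i 3 (by omega)
  norm_num at e1 e2 e3
  simp [pvBMatch, pvMatch, e0, e1, e2, e3]

-- B's two stages compose to the one-pass scan
theorem splice_starts (sent : List (String × String)) :
    ∀ (n i prev : ℕ), n = sent.length - i → prev ≤ i →
      pvSplice sent prev (pvStarts sent i) =
        (sent.drop prev).take (i - prev) ++ pvBGo (sent.drop i) := by
  intro n
  induction n using Nat.strong_induction_on with
  | _ n ih =>
    intro i prev hn hpi
    by_cases hb : i + 3 < sent.length
    · have h0 : i < sent.length := by omega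
      have e0 := pyGetD_idx sent i (by omega)
      have e1 := pyGetD_shift sent i 1 (by omega)
      have e2 := pyGetD_shift sent i 2 (by omega)
      have e3 := pyGetD_shift sent i 3 (by omega)
      norm_num at e1 e2 e3
      rw [pvStarts, if_pos hb, pvBMatch_eq sent i hb]
      rw [drop_four sent i (by exact_mod_cast by omega)]
      by_cases hm : pvMatch (sent[i]) (sent[i+1]) (sent[i+2]) (sent[i+3])
      · rw [if_pos hm]
        simp only [pvSplice, e0, e1, e2, e3]
        rw [ih (sent.length - (i + 4)) (by omega) (i + 4) (i + 4) rfl (by omega)]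
        rw [PySem.List.slice_natCast]
        simp [pvBGo, hm]
      · rw [if_neg hm]
        rw [ih (sent.length - (i + 1)) (by omega) (i + 1) prev (by omega) (by omega)]
        have htake : (sent.drop prev).take (i + 1 - prev) =
            (sent.drop prev).take (i - prev) ++ [sent[i]] := by
          rw [show i + 1 - prev = (i - prev) + 1 by omega, List.take_add_one]
          have : (sent.drop prev)[i - prev]? = some sent[i] := by
            rw [List.getElem?_drop, show prev + (i - prev) = i by omega]
            exact List.getElem?_eq_getElem h0
          simp [this]
        rw [htake, List.drop_eq_getElem_cons (show i + 1 < sent.length by omega),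
            List.drop_eq_getElem_cons (show i + 2 < sent.length by omega),
            List.drop_eq_getElem_cons (show i + 3 < sent.length by omega)]
        simp [pvBGo, hm]
    · rw [pvStarts, if_neg hb]
      simp only [pvSplice]
      rw [PySem.List.slice_from_natCast,
          pvBGo_short (sent.drop i) (by simp [List.length_drop]; omega)]
      have hdd : (sent.drop prev).drop (i - prev) = sent.drop i := by
        rw [List.drop_drop, show prev + (i - prev) = i by omega]
      calc sent.drop prev
          = (sent.drop prev).take (i - prev) ++ (sent.drop prev).drop (i - prev) :=
            (List.take_append_drop _ _).symm
        _ = (sent.drop prev).take (i - prev) ++ sent.drop i := by rw [hdd]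

-- ===== VERDICT (by name: the statement is the Claim_ definition above) =====
theorem MD_UNK_better_IN_Tagger_spec : Claim_equal_MD_UNK_better_IN_Tagger := by
  intro sent _
  unfold Spec_MD_UNK_better_IN_Tagger MD_UNK_better_IN_Tagger MD_UNK_better_IN_Tagger_alt
  rw [show List.range sent.length = List.range' 0 sent.length from List.range_eq_range' ..,
      loopA_eq_go sent sent.length 0 [] (by omega),
      splice_starts sent sent.length 0 0 (by omega) (by omega)]
  simp
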